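-- pv_equiv track=rewrite | github.com/SharmaPrakhar25/social-brain | services/instagram_extractor.py | extract_topics_from_hashtags
-- ===== SOURCE A (Python) =====
-- from typing import Dict, List, Optional
--
-- def extract_topics_from_hashtags(hashtags: List[str]) -> List[str]:
--     """
--     Extract general topics from hashtags
--     """
--     if not hashtags:
--         return []
--
--     topic_mapping = {
--         'fitness': ['#fitness', '#workout', '#gym', '#training', '#health'],
--         'food': ['#food', '#recipe', '#cooking', '#chef', '#delicious'],
--         'travel': ['#travel', '#vacation', '#explore', '#adventure', '#wanderlust'],
--         'fashion': ['#fashion', '#style', '#outfit', '#ootd', '#clothing'],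
--         'technology': ['#tech', '#technology', '#ai', '#coding', '#programming'],
--         'business': ['#business', '#entrepreneur', '#startup', '#marketing', '#success'],
--         'art': ['#art', '#artist', '#drawing', '#painting', '#creative'],
--         'music': ['#music', '#song', '#artist', '#concert', '#musician'],
--         'lifestyle': ['#lifestyle', '#life', '#daily', '#inspiration', '#motivation']
--     }
--
--     detected_topics = []
--     hashtags_lower = [tag.lower() for tag in hashtags]
--
--     for topic, topic_tags in topic_mapping.items():
--         if any(tag in hashtags_lower for tag in topic_tags):
--             detected_topics.append(topic)
--
--     return detected_topics
-- ===== SOURCE B (Python) =====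
-- # Hand-written inverted index: each tag maps to the list of topics containing it
-- # ('#artist' belongs to both 'art' and 'music').
-- _TAG_TOPICS = {
--     '#fitness': ['fitness'],
--     '#workout': ['fitness'],
--     '#gym': ['fitness'],
--     '#training': ['fitness'],
--     '#health': ['fitness'],
--     '#food': ['food'],
--     '#recipe': ['food'],
--     '#cooking': ['food'],
--     '#chef': ['food'],
--     '#delicious': ['food'],
--     '#travel': ['travel'],
--     '#vacation': ['travel'],
--     '#explore': ['travel'],
--     '#adventure': ['travel'],
--     '#wanderlust': ['travel'],
--     '#fashion': ['fashion'],
--     '#style': ['fashion'],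
--     '#outfit': ['fashion'],
--     '#ootd': ['fashion'],
--     '#clothing': ['fashion'],
--     '#tech': ['technology'],
--     '#technology': ['technology'],
--     '#ai': ['technology'],
--     '#coding': ['technology'],
--     '#programming': ['technology'],
--     '#business': ['business'],
--     '#entrepreneur': ['business'],
--     '#startup': ['business'],
--     '#marketing': ['business'],
--     '#success': ['business'],
--     '#art': ['art'],
--     '#artist': ['art', 'music'],
--     '#drawing': ['art'],
--     '#painting': ['art'],
--     '#creative': ['art'],
--     '#music': ['music'],
--     '#song': ['music'],
--     '#concert': ['music'],
--     '#musician': ['music'],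
--     '#lifestyle': ['lifestyle'],
--     '#life': ['lifestyle'],
--     '#daily': ['lifestyle'],
--     '#inspiration': ['lifestyle'],
--     '#motivation': ['lifestyle'],
-- }
--
-- # output order = the original mapping's insertion order
-- _TOPIC_ORDER = ['fitness', 'food', 'travel', 'fashion', 'technology',
--                 'business', 'art', 'music', 'lifestyle']
--
--
-- def extract_topics_from_hashtags(hashtags):
--     present = set()
--     for tag in hashtags:
--         present.update(_TAG_TOPICS.get(tag.lower(), []))
--     return [topic for topic in _TOPIC_ORDER if topic in present]
-- ===== Notes on version B (the rewrite author's own statement) =====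
-- stated objective: faster
-- what changed: Replaces A's per-topic any-scan of the lowered hashtag list (45 tag membership tests, each a linear scan) with a literal inverted index tag->topics ('#artist' maps to both 'art' and 'music'): one hash lookup per hashtag collects a 'present' set, then the 9 topics are filtered in the original mapping order.
import Mathlib
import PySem

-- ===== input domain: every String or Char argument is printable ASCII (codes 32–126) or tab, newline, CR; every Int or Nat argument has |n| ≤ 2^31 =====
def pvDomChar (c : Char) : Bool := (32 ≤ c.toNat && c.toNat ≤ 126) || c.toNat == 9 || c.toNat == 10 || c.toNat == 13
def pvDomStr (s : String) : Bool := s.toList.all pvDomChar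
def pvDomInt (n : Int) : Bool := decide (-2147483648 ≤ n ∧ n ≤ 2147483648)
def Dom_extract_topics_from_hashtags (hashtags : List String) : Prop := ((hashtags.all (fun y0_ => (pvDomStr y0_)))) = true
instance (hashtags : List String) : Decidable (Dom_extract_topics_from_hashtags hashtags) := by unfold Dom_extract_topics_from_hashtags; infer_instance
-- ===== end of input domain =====

-- B replaces A's per-topic scan of the lowered hashtag list by a hand-written literal
-- inverted index (tag -> topics) consulted once per hashtag; objective: faster by constant factor.

-- ===== PORT A =====
def pvTopicMappingA : PySem.Dict String (List String) := PySem.Dict.ofList [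
  ("fitness", ["#fitness", "#workout", "#gym", "#training", "#health"]),
  ("food", ["#food", "#recipe", "#cooking", "#chef", "#delicious"]),
  ("travel", ["#travel", "#vacation", "#explore", "#adventure", "#wanderlust"]),
  ("fashion", ["#fashion", "#style", "#outfit", "#ootd", "#clothing"]),
  ("technology", ["#tech", "#technology", "#ai", "#coding", "#programming"]),
  ("business", ["#business", "#entrepreneur", "#startup", "#marketing", "#success"]),
  ("art", ["#art", "#artist", "#drawing", "#painting", "#creative"]),
  ("music", ["#music", "#song", "#artist", "#concert", "#musician"]),
  ("lifestyle", ["#lifestyle", "#life", "#daily", "#inspiration", "#motivation"])]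

def extract_topics_from_hashtags (hashtags : List String) : List String :=
  if hashtags = [] then []
  else
    let hashtags_lower := hashtags.map PySem.Str.lower
    pvTopicMappingA.items.foldl
      (fun detected p =>
        if p.2.any (fun tag => hashtags_lower.contains tag) then detected ++ [p.1]
        else detected) []

-- ===== PORT B =====
-- literal inverted index, written out in Source B by hand ('#artist' belongs to two topics)
def pvTagIndex : PySem.Dict String (List String) := PySem.Dict.ofList [
  ("#fitness", ["fitness"]), ("#workout", ["fitness"]), ("#gym", ["fitness"]),
  ("#training", ["fitness"]), ("#health", ["fitness"]),
  ("#food", ["food"]), ("#recipe", ["food"]), ("#cooking", ["food"]),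
  ("#chef", ["food"]), ("#delicious", ["food"]),
  ("#travel", ["travel"]), ("#vacation", ["travel"]), ("#explore", ["travel"]),
  ("#adventure", ["travel"]), ("#wanderlust", ["travel"]),
  ("#fashion", ["fashion"]), ("#style", ["fashion"]), ("#outfit", ["fashion"]),
  ("#ootd", ["fashion"]), ("#clothing", ["fashion"]),
  ("#tech", ["technology"]), ("#technology", ["technology"]), ("#ai", ["technology"]),
  ("#coding", ["technology"]), ("#programming", ["technology"]),
  ("#business", ["business"]), ("#entrepreneur", ["business"]), ("#startup", ["business"]),
  ("#marketing", ["business"]), ("#success", ["business"]),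
  ("#art", ["art"]), ("#artist", ["art", "music"]), ("#drawing", ["art"]),
  ("#painting", ["art"]), ("#creative", ["art"]),
  ("#music", ["music"]), ("#song", ["music"]), ("#concert", ["music"]),
  ("#musician", ["music"]),
  ("#lifestyle", ["lifestyle"]), ("#life", ["lifestyle"]), ("#daily", ["lifestyle"]),
  ("#inspiration", ["lifestyle"]), ("#motivation", ["lifestyle"])]

def pvTopicOrder : List String :=
  ["fitness", "food", "travel", "fashion", "technology", "business", "art", "music", "lifestyle"]

def extract_topics_from_hashtags_alt (hashtags : List String) : List String :=
  let present : PySem.Set String :=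
    hashtags.foldl (fun s tag => PySem.Set.update s (pvTagIndex.getD (PySem.Str.lower tag) [])) PySem.Set.empty
  pvTopicOrder.filter (fun topic => PySem.Set.contains present topic)

-- ===== PRECONDITION & SPEC =====
def Spec_extract_topics_from_hashtags (hashtags : List String) (out : List String) : Prop := out = extract_topics_from_hashtags_alt hashtags
instance (hashtags : List String) (out : List String) : Decidable (Spec_extract_topics_from_hashtags hashtags out) := by unfold Spec_extract_topics_from_hashtags; infer_instance

-- ===== CLAIM (what is proved, stated in full; the proofs are below) =====
def Claim_equal_extract_topics_from_hashtags : Prop := ∀ (hashtags : List String), Dom_extract_topics_from_hashtags hashtags → Spec_extract_topics_from_hashtags hashtags (extract_topics_from_hashtags hashtags)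

-- ===== LEMMAS AND PROOFS =====

-- the flattened (tag, topic) pair list of A's table
def pvTableList : List (String × List String) := [
  ("fitness", ["#fitness", "#workout", "#gym", "#training", "#health"]),
  ("food", ["#food", "#recipe", "#cooking", "#chef", "#delicious"]),
  ("travel", ["#travel", "#vacation", "#explore", "#adventure", "#wanderlust"]),
  ("fashion", ["#fashion", "#style", "#outfit", "#ootd", "#clothing"]),
  ("technology", ["#tech", "#technology", "#ai", "#coding", "#programming"]),
  ("business", ["#business", "#entrepreneur", "#startup", "#marketing", "#success"]),
  ("art", ["#art", "#artist", "#drawing", "#painting", "#creative"]),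
  ("music", ["#music", "#song", "#artist", "#concert", "#musician"]),
  ("lifestyle", ["#lifestyle", "#life", "#daily", "#inspiration", "#motivation"])]

lemma pvItems_eq : pvTopicMappingA.items = pvTableList := by decide

def pvPairs : List (String × String) :=
  pvTableList.flatMap (fun p => p.2.map (fun t => (t, p.1)))

-- B's literal index coincides with the index the pair list folds up to
set_option maxRecDepth 40000 in
lemma pvTagIndex_eq_foldl_pairs :
    pvTagIndex = pvPairs.foldl (fun d q => d.modify q.1 [] (· ++ [q.2])) PySem.Dict.empty := by
  decide

lemma getD_pvTagIndex (y : String) :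
    pvTagIndex.getD y [] = (pvPairs.filter (fun q => q.1 == y)).map (·.2) := by
  rw [pvTagIndex_eq_foldl_pairs, PySem.Dict.getD_foldl_modify_append]
  simp [PySem.Dict.getD_empty]

-- B's topic-order list is A's table's key list
lemma pvTopicOrder_eq : pvTopicOrder = pvTopicMappingA.items.map Prod.fst := by decide

-- membership in the accumulated 'present' set
lemma mem_present (hs : List String) (s : PySem.Set String) (t : String) :
    t ∈ hs.foldl (fun s tag => PySem.Set.update s (pvTagIndex.getD (PySem.Str.lower tag) [])) s ↔
      t ∈ s ∨ ∃ h ∈ hs, t ∈ pvTagIndex.getD (PySem.Str.lower h) [] := by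
  induction hs generalizing s with
  | nil => simp
  | cons x xs ih =>
      rw [List.foldl_cons, ih]
      simp only [PySem.Set.mem_update, List.mem_cons]
      aesop

-- for each topic of A's table, its presence in the index value at y is exactly y being one of its tags
set_option maxHeartbeats 1000000 in
lemma idx_iff (p : String × List String) (hp : p ∈ pvTopicMappingA.items) (y : String) :
    p.1 ∈ pvTagIndex.getD y [] ↔ y ∈ p.2 := by
  rw [getD_pvTagIndex, pvItems_eq] at *
  simp only [List.mem_map, List.mem_filter, beq_iff_eq]
  fin_cases hp <;> simp [pvPairs, pvTableList]

-- ===== VERDICT (by name: the statement is the Claim_ definition above) =====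
set_option maxRecDepth 40000 in
theorem extract_topics_from_hashtags_spec : Claim_equal_extract_topics_from_hashtags := by
  intro hashtags _
  unfold Spec_extract_topics_from_hashtags
  unfold extract_topics_from_hashtags extract_topics_from_hashtags_alt
  by_cases hnil : hashtags = []
  · subst hnil; decide
  · simp only [if_neg hnil]
    rw [PySem.List.foldl_append_if, List.nil_append, pvTopicOrder_eq, List.filter_map]
    apply congrArg (List.map Prod.fst)
    apply List.filter_congr
    intro p hp
    simp only [Function.comp_apply]
    rw [Bool.eq_iff_iff]
    simp only [List.any_eq_true, List.contains_iff_mem, List.mem_map,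
      PySem.Set.contains_iff, mem_present, List.not_mem_nil, PySem.Set.empty,
      false_or, idx_iff p hp]
    constructor
    · rintro ⟨tag, ht, h, hh, rfl⟩
      exact ⟨h, hh, ht⟩
    · rintro ⟨h, hh, ht⟩
      exact ⟨_, ht, h, hh, rfl⟩
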